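-- pv_equiv track=rewrite | github.com/milokv/skola | progolympiad4.py | make_teams
-- ===== SOURCE A (Python) =====
-- def make_teams(que):
--     que.sort()
--     if len(que)%2: que.insert(0,0)
--     t1,t2 = [],[]
--     while que:
--         val = (que.pop(), que.pop())
--         if sum(t1)>sum(t2):
--             t2.append(val[0])
--             t1.append(val[1])
--         else:
--             t1.append(val[0])
--             t2.append(val[1])
--     return(t1)
-- ===== SOURCE B (Python) =====
-- def make_teams(que):
--     vals = sorted(que, reverse=True)
--     if len(vals) % 2:
--         vals.append(0)
--     t1, s1, s2 = [], 0, 0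
--     for a, b in zip(vals[::2], vals[1::2]):
--         if s1 > s2:
--             t1.append(b)
--             s1 += b
--             s2 += a
--         else:
--             t1.append(a)
--             s1 += a
--             s2 += b
--     return t1
-- ===== Notes on version B (the rewrite author's own statement) =====
-- stated objective: faster
-- what changed: B sorts once in descending order and makes a single pass over consecutive pairs while maintaining both team sums incrementally, instead of A's loop that pops from the back of the list and re-sums both teams on every iteration.
import Mathlib
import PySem

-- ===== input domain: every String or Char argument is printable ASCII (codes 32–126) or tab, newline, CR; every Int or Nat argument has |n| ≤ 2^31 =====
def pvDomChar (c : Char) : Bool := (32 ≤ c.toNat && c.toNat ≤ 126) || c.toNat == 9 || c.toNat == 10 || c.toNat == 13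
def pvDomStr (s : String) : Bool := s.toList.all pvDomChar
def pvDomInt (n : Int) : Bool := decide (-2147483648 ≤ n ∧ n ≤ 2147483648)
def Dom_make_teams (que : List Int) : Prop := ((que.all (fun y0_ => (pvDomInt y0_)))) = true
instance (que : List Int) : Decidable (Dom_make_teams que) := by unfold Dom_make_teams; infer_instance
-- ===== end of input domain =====

-- B replaces A's re-summing of both teams on every iteration (and its pop-from-the-back loop)
-- by one pass over the descending sorted list, pairing consecutive elements and maintaining the
-- two team sums incrementally: O(n log n) instead of O(n^2).  Equivalence is about the RETURN
-- value only: Python A sorts and empties its argument in place, B leaves it untouched.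

-- ===== PORT A =====
-- while que: val = (que.pop(), que.pop()); …   (pop() = pop at index -1)
def loopA (que t1 t2 : List Int) : List Int :=
  if que = [] then t1
  else
    match h1 : PySem.List.pop? que (-1) with
    | none => t1  -- unreachable: que ≠ []
    | some (v0, q1) =>
      match h2 : PySem.List.pop? q1 (-1) with
      | none => t1  -- unreachable: que always has even length here (Python never raises)
      | some (v1, q2) =>
        if t1.sum > t2.sum then loopA q2 (t1 ++ [v1]) (t2 ++ [v0])
        else loopA q2 (t1 ++ [v0]) (t2 ++ [v1])
termination_by que.length
decreasing_by
  all_goals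
    have e1 := PySem.List.length_of_pop?_eq_some que h1
    have e2 := PySem.List.length_of_pop?_eq_some q1 h2
    simp at e1 e2
    omega

def make_teams (que : List Int) : List Int :=
  let q0 := PySem.List.sorted que (fun x => x) false         -- que.sort()
  let q1 := if q0.length % 2 ≠ 0 then PySem.List.insert q0 0 0 else q0   -- if len(que)%2: que.insert(0,0)
  loopA q1 [] []

-- ===== PORT B =====
-- zip(it, it) on one iterator yields the consecutive disjoint pairs of vals, in order
def pairUp : List Int → List (Int × Int)
  | a :: b :: r => (a, b) :: pairUp r
  | _ => []

def make_teams_alt (que : List Int) : List Int :=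
  let vals0 := PySem.List.sorted que (fun x => x) true       -- sorted(que, reverse=True)
  let vals := if vals0.length % 2 ≠ 0 then vals0 ++ [0] else vals0   -- vals.append(0)
  ((pairUp vals).foldl
    (fun st ab =>
      if st.2.1 > st.2.2 then (st.1 ++ [ab.2], st.2.1 + ab.2, st.2.2 + ab.1)
      else (st.1 ++ [ab.1], st.2.1 + ab.1, st.2.2 + ab.2))
    (([] : List Int), (0 : Int), (0 : Int))).1

-- ===== PRECONDITION & SPEC =====
def Spec_make_teams (que : List Int) (out : List Int) : Prop := out = make_teams_alt que
instance (que : List Int) (out : List Int) : Decidable (Spec_make_teams que out) := by unfold Spec_make_teams; infer_instance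

-- ===== CLAIM (what is proved, stated in full; the proofs are below) =====
def Claim_equal_make_teams : Prop := ∀ (que : List Int), Dom_make_teams que → Spec_make_teams que (make_teams que)

-- ===== LEMMAS AND PROOFS =====

-- shared spine: pair recursion with explicit running sums
def goB : List Int → List Int → Int → Int → List Int
  | a :: b :: r, t1, s1, s2 =>
      if s1 > s2 then goB r (t1 ++ [b]) (s1 + b) (s2 + a)
      else goB r (t1 ++ [a]) (s1 + a) (s2 + b)
  | _, t1, _, _ => t1

-- B's fold over the paired-up list is goB
lemma foldB_eq_goB (l t1 : List Int) (s1 s2 : Int) :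
    ((pairUp l).foldl
      (fun st ab =>
        if st.2.1 > st.2.2 then (st.1 ++ [ab.2], st.2.1 + ab.2, st.2.2 + ab.1)
        else (st.1 ++ [ab.1], st.2.1 + ab.1, st.2.2 + ab.2))
      (t1, s1, s2)).1 = goB l t1 s1 s2 := by
  induction l using pairUp.induct generalizing t1 s1 s2 with
  | case1 a b r ih =>
      simp only [pairUp, List.foldl_cons, goB]
      by_cases h : s1 > s2 <;> simp [h, ih]
  | case2 l h =>
      match l, h with
      | [], _ => simp [pairUp, goB]
      | [a], _ => simp [pairUp, goB]
      | a :: b :: r, h => exact (h a b r rfl).elim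

-- one iteration of A's while-loop: popping the two last elements
lemma loopA_step (q : List Int) (b a : Int) (t1 t2 : List Int) :
    loopA ((q ++ [b]) ++ [a]) t1 t2 =
      if t1.sum > t2.sum then loopA q (t1 ++ [b]) (t2 ++ [a])
      else loopA q (t1 ++ [a]) (t2 ++ [b]) := by
  rw [loopA, if_neg (by simp)]
  split
  · next heq => rw [PySem.List.pop?_last] at heq; cases heq
  · next v0 q1 heq =>
      rw [PySem.List.pop?_last] at heq
      simp only [Option.some.injEq, Prod.mk.injEq] at heq
      obtain ⟨rfl, rfl⟩ := heq
      split
      · next heq2 => rw [PySem.List.pop?_last] at heq2; cases heq2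
      · next v1 q2 heq2 =>
          rw [PySem.List.pop?_last] at heq2
          simp only [Option.some.injEq, Prod.mk.injEq] at heq2
          obtain ⟨rfl, rfl⟩ := heq2
          rfl

-- A's pop-from-the-back loop over m.reverse is goB over m, with sums made explicit
lemma loopA_rev_eq_goB (m t1 t2 : List Int) :
    loopA m.reverse t1 t2 = goB m t1 t1.sum t2.sum := by
  induction m using pairUp.induct generalizing t1 t2 with
  | case1 a b r ih =>
      have hrw : (a :: b :: r).reverse = (r.reverse ++ [b]) ++ [a] := by simp
      rw [hrw, loopA_step]
      by_cases h : t1.sum > t2.sum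
      · simp [h, ih, goB]
      · simp [h, ih, goB]
  | case2 l h =>
      match l, h with
      | [], _ => rw [loopA]; simp [goB]
      | [a], _ =>
          rw [show ([a] : List Int).reverse = [a] by simp, loopA,
              show PySem.List.pop? [a] (-1) = some (a, []) from rfl]
          simp
          split
          · rfl
          · next v1 q2 heq => simp [PySem.List.pop?, PySem.List.pyIdx?] at heq
      | a :: b :: r, h => exact (h a b r rfl).elim

-- sorting descending is the reverse of sorting ascending (id key on Int)
lemma sorted_rev_eq_reverse (xs : List Int) :
    PySem.List.sorted xs (fun x => x) true = (PySem.List.sorted xs (fun x => x) false).reverse := by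
  have h := PySem.List.sorted_id_eq_of_perm_of_pairwise xs
      (PySem.List.sorted xs (fun x => x) true).reverse
      ((List.reverse_perm _).trans (PySem.List.sorted_perm xs (fun x => x) true))
      (List.pairwise_reverse.mpr (PySem.List.sorted_pairwise_rev xs (fun x => x)))
  have := congrArg List.reverse h
  simpa using this.symm

-- ===== VERDICT (by name: the statement is the Claim_ definition above) =====
theorem make_teams_spec : Claim_equal_make_teams := by
  intro que _
  unfold Spec_make_teams make_teams make_teams_alt
  rw [foldB_eq_goB, sorted_rev_eq_reverse]
  set s := PySem.List.sorted que (fun x => x) false with hs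
  simp only [List.length_reverse]
  by_cases h : s.length % 2 ≠ 0
  · simp only [if_pos h, PySem.List.insert_zero]
    rw [show (0 :: s) = (s.reverse ++ [0]).reverse by simp, loopA_rev_eq_goB]
    simp
  · simp only [if_neg h]
    conv_lhs => rw [show s = s.reverse.reverse by simp]
    rw [loopA_rev_eq_goB]
    simp
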